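-- pv_equiv track=rewrite | github.com/mohammedd2002/Ai-modeeel | main.py | calculate_wrong_questions
-- ===== SOURCE A (Python) =====
-- def calculate_wrong_questions(score, max_topic_score=70):
--     missing_score = max_topic_score - score
--     easy = medium = hard = 0
--     while missing_score >= 20 and hard < 2:
--         hard += 1
--         missing_score -= 20
--     while missing_score >= 10 and medium < 2:
--         medium += 1
--         missing_score -= 10
--     while missing_score >= 5 and easy < 2:
--         easy += 1
--         missing_score -= 5
--     return easy, medium, hard
-- ===== SOURCE B (Python) =====
-- def calculate_wrong_questions(score, max_topic_score=70):
--     missing = max_topic_score - score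
--     hard = 2 if missing >= 40 else 1 if missing >= 20 else 0
--     missing -= 20 * hard
--     medium = 2 if missing >= 20 else 1 if missing >= 10 else 0
--     missing -= 10 * medium
--     easy = 2 if missing >= 10 else 1 if missing >= 5 else 0
--     return easy, medium, hard
-- ===== Notes on version B (the rewrite author's own statement) =====
-- stated objective: simpler
-- what changed: Replaced A's three counting while-loops (each subtracting a step up to twice) by direct closed-form conditional assignments of each count followed by a single subtraction.
import Mathlib
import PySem

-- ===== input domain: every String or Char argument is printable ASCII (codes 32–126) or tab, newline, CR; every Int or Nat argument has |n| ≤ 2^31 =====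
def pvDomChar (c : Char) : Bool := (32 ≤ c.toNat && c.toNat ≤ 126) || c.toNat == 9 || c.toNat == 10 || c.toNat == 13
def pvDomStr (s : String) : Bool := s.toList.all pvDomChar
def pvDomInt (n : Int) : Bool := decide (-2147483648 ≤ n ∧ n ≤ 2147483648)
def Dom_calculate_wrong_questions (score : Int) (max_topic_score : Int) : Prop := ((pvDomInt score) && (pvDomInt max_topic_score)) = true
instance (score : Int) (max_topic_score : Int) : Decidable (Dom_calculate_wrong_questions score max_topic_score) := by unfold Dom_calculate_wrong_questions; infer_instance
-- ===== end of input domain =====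

-- B replaces A's three counting while-loops by closed-form conditional assignments; objective: simpler.

-- ===== PORT A =====
-- transliteration of A's 'while missing_score >= step and cnt < 2' loop (step = 20 / 10 / 5)
def wqLoop (step : Int) (missing : Int) (cnt : Int) : Int × Int :=
  if missing ≥ step ∧ cnt < 2 then wqLoop step (missing - step) (cnt + 1) else (missing, cnt)
termination_by (2 - cnt).toNat
decreasing_by omega

def calculate_wrong_questions (score : Int) (max_topic_score : Int) : Int × Int × Int :=
  let missing0 := max_topic_score - score
  let (missing1, hard) := wqLoop 20 missing0 0
  let (missing2, medium) := wqLoop 10 missing1 0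
  let (_missing3, easy) := wqLoop 5 missing2 0
  (easy, medium, hard)

-- ===== PORT B =====
def calculate_wrong_questions_alt (score : Int) (max_topic_score : Int) : Int × Int × Int :=
  let missing := max_topic_score - score
  let hard : Int := if missing ≥ 40 then 2 else if missing ≥ 20 then 1 else 0
  let missing := missing - 20 * hard
  let medium : Int := if missing ≥ 20 then 2 else if missing ≥ 10 then 1 else 0
  let missing := missing - 10 * medium
  let easy : Int := if missing ≥ 10 then 2 else if missing ≥ 5 then 1 else 0
  (easy, medium, hard)

-- ===== PRECONDITION & SPEC =====
def Spec_calculate_wrong_questions (score : Int) (max_topic_score : Int) (out : Int × Int × Int) : Prop := out = calculate_wrong_questions_alt score max_topic_score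
instance (score : Int) (max_topic_score : Int) (out : Int × Int × Int) : Decidable (Spec_calculate_wrong_questions score max_topic_score out) := by unfold Spec_calculate_wrong_questions; infer_instance

-- ===== CLAIM (what is proved, stated in full; the proofs are below) =====
def Claim_equal_calculate_wrong_questions : Prop := ∀ (score : Int) (max_topic_score : Int), Dom_calculate_wrong_questions score max_topic_score → Spec_calculate_wrong_questions score max_topic_score (calculate_wrong_questions score max_topic_score)

-- ===== LEMMAS AND PROOFS =====
-- A's loop, started at counter 0, performs 0, 1 or 2 subtractions of `step` depending on missing's size.
theorem wqLoop_zero (s : Int) (hs : 0 < s) (m : Int) :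
    wqLoop s m 0 = if 2 * s ≤ m then (m - 2 * s, 2) else if s ≤ m then (m - s, 1) else (m, 0) := by
  rw [wqLoop]
  rw [wqLoop]
  rw [wqLoop]
  split_ifs <;> simp_all [Prod.ext_iff] <;> omega

-- ===== VERDICT (by name: the statement is the Claim_ definition above) =====
set_option maxHeartbeats 1000000 in
theorem calculate_wrong_questions_spec : Claim_equal_calculate_wrong_questions := by
  intro score max_topic_score _
  unfold Spec_calculate_wrong_questions
  simp only [calculate_wrong_questions, calculate_wrong_questions_alt,
    wqLoop_zero 20 (by norm_num), wqLoop_zero 10 (by norm_num), wqLoop_zero 5 (by norm_num)]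
  split_ifs <;> simp only [Prod.mk.injEq] <;> omega
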